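-- pv_equiv track=rewrite | github.com/michaelbironneau/rotary | main.py | get_museum_req_constraints
-- ===== SOURCE A (Python) =====
-- def ix(museum_ix, mvsas_ix, day_ix, p_len, d_len):
--     """Return the index of the variable list represented by the composite indexes"""
--     return day_ix + (d_len)*(mvsas_ix + (p_len)*(museum_ix))
--
-- def get_museum_req_constraints(museums, mvsas, days):
--     """Museum must have at least N MVSAs on given day"""
--     constraints = []
--     constraint_b = []
--     for museum_ix, m in enumerate(museums):
--         for day_ix, d in enumerate(days):
--             m_reqs = m["reqs"][d]
--             constraints.append([0]*len(mvsas)*len(museums)*len(days))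
--             constraint_b.append(-1*m_reqs)  # times by -1 to convert to <=
--             for mvsa_ix, _ in enumerate(mvsas):
--                 constraints[len(constraints)-1][ix(museum_ix, mvsa_ix, day_ix, len(mvsas), len(days))] = -1
--     return (constraints, constraint_b)
-- ===== SOURCE B (Python) =====
-- def get_museum_req_constraints(museums, mvsas, days):
--     """Museum must have at least N MVSAs on given day"""
--     M, V, D = len(museums), len(mvsas), len(days)
--     constraints = []
--     constraint_b = []
--     for museum_ix, m in enumerate(museums):
--         for day_ix, d in enumerate(days):
--             unit = [0] * day_ix + [-1] + [0] * (D - 1 - day_ix)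
--             constraints.append([0] * (museum_ix * V * D)
--                                + unit * V
--                                + [0] * ((M - 1 - museum_ix) * V * D))
--             constraint_b.append(-m["reqs"][d])
--     return (constraints, constraint_b)
-- ===== Notes on version B (the rewrite author's own statement) =====
-- stated objective: simpler
-- what changed: B drops the ix index helper and the allocate-zero-row-then-scatter-write construction; each constraint row is built directly in block form as leading zeros ++ V repetitions of a unit day-block (zeros with a single -1 at the day position) ++ trailing zeros.
import Mathlib
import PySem

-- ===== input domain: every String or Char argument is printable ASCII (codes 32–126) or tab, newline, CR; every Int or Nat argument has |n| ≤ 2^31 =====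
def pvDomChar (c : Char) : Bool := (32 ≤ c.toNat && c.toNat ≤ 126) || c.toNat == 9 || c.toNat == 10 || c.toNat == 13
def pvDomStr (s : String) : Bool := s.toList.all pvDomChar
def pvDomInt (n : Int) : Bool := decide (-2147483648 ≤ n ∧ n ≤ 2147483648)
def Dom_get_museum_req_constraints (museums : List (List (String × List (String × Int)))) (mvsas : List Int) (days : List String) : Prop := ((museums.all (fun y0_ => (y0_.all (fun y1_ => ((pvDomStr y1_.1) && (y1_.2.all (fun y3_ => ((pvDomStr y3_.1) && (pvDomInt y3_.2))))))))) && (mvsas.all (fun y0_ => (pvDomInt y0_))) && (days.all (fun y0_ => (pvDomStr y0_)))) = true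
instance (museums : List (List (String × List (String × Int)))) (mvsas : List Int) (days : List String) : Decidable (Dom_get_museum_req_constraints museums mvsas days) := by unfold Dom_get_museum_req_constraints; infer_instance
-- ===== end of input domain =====

-- B replaces A's zero-row allocation plus scatter writes through the composite `ix`
-- helper by a direct block-structured construction of each row (simpler; same cost).

-- ===== PORT A =====
-- helper `ix` of A, verbatim
def pvIx (museum_ix mvsas_ix day_ix p_len d_len : Int) : Int :=
  day_ix + d_len * (mvsas_ix + p_len * museum_ix)

-- Python appends the zero row and then assigns constraints[-1][ix(...)] = -1 for each
-- mvsa; the port performs the same in-place writes on the row before appending it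
-- (the appended list value is identical).
def get_museum_req_constraints (museums : List (List (String × List (String × Int)))) (mvsas : List Int) (days : List String) : List (List Int) × List Int :=
  (PySem.List.enumerate museums 0).foldl (fun acc mm =>
    (PySem.List.enumerate days 0).foldl (fun acc dd =>
      let m_reqs : Int := (PySem.Dict.mk ((PySem.Dict.mk mm.2).getD "reqs" [])).getD dd.2 0
      let row0 : List Int := List.replicate (mvsas.length * museums.length * days.length) 0
      let row : List Int := (PySem.List.enumerate mvsas 0).foldl
        (fun r vv => PySem.List.pySetD r (pvIx mm.1 vv.1 dd.1 (mvsas.length : Int) (days.length : Int)) (-1)) row0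
      (acc.1 ++ [row], acc.2 ++ [-1 * m_reqs])) acc)
    (([], []) : List (List Int) × List Int)

-- ===== PORT B =====
def get_museum_req_constraints_alt (museums : List (List (String × List (String × Int)))) (mvsas : List Int) (days : List String) : List (List Int) × List Int :=
  let M : Int := museums.length
  let V : Int := mvsas.length
  let D : Int := days.length
  (PySem.List.enumerate museums 0).foldl (fun acc mm =>
    (PySem.List.enumerate days 0).foldl (fun acc dd =>
      let unit : List Int := PySem.List.pyRepeat [0] dd.1 ++ [-1] ++ PySem.List.pyRepeat [0] (D - 1 - dd.1)
      let row : List Int := PySem.List.pyRepeat [0] (mm.1 * V * D)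
        ++ PySem.List.pyRepeat unit V
        ++ PySem.List.pyRepeat [0] ((M - 1 - mm.1) * V * D)
      (acc.1 ++ [row], acc.2 ++ [-((PySem.Dict.mk ((PySem.Dict.mk mm.2).getD "reqs" [])).getD dd.2 0)])) acc)
    (([], []) : List (List Int) × List Int)

-- ===== PRECONDITION & SPEC =====
-- Pre_ excludes exactly the inputs on which the Python A raises KeyError:
-- some museum, with days nonempty, lacks the "reqs" key or the entry for some day.
def Pre_get_museum_req_constraints (museums : List (List (String × List (String × Int)))) (mvsas : List Int) (days : List String) : Prop :=
  ∀ m ∈ museums, ∀ d ∈ days,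
    (((PySem.Dict.mk m).get? "reqs").bind (fun r => (PySem.Dict.mk r).get? d)).isSome = true
instance (museums : List (List (String × List (String × Int)))) (mvsas : List Int) (days : List String) : Decidable (Pre_get_museum_req_constraints museums mvsas days) := by unfold Pre_get_museum_req_constraints; infer_instance
def pvWitness_get_museum_req_constraints : (List (List (String × List (String × Int)))) × List Int × List String :=
  ([[("reqs", [("Mon", 2)])]], [7], ["Mon"])
def Spec_get_museum_req_constraints (museums : List (List (String × List (String × Int)))) (mvsas : List Int) (days : List String) (out : List (List Int) × List Int) : Prop := out = get_museum_req_constraints_alt museums mvsas days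
instance (museums : List (List (String × List (String × Int)))) (mvsas : List Int) (days : List String) (out : List (List Int) × List Int) : Decidable (Spec_get_museum_req_constraints museums mvsas days out) := by unfold Spec_get_museum_req_constraints; infer_instance

-- ===== CLAIM (what is proved, stated in full; the proofs are below) =====
def Claim_equal_get_museum_req_constraints : Prop := ∀ (museums : List (List (String × List (String × Int)))) (mvsas : List Int) (days : List String), Dom_get_museum_req_constraints museums mvsas days → Pre_get_museum_req_constraints museums mvsas days → Spec_get_museum_req_constraints museums mvsas days (get_museum_req_constraints museums mvsas days)

-- ===== LEMMAS AND PROOFS =====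

-- the "unit" day block: a zero row of length D with -1 at position di
def pvUnit (di D : Nat) : List Int :=
  List.replicate di 0 ++ [-1] ++ List.replicate (D - 1 - di) 0

theorem pvUnit_length {di D : Nat} (hd : di < D) : (pvUnit di D).length = D := by
  simp [pvUnit]; omega

theorem set_replicate_eq_unit {di D : Nat} (hd : di < D) :
    (List.replicate D (0 : Int)).set di (-1) = pvUnit di D := by
  induction di generalizing D with
  | zero =>
    obtain ⟨D', rfl⟩ : ∃ D', D = D' + 1 := ⟨D - 1, by omega⟩
    simp [pvUnit, List.replicate_succ]
  | succ d ih =>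
    obtain ⟨D', rfl⟩ : ∃ D', D = D' + 1 := ⟨D - 1, by omega⟩
    have h := ih (D := D') (by omega)
    simp only [pvUnit, List.replicate_succ, List.set_cons_succ, List.cons_append] at h ⊢
    rw [h]
    have : D' - 1 - d = D' + 1 - 1 - (d + 1) := by omega
    rw [this]

-- a fold of in-range writes past a common prefix factors through the prefix
theorem fold_set_shift {α : Type} (idx : List Nat) (v : α) (pre X : List α) :
    idx.foldl (fun r i => r.set (pre.length + i) v) (pre ++ X)
      = pre ++ idx.foldl (fun r i => r.set i v) X := by
  induction idx generalizing X with
  | nil => rfl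
  | cons i t ih =>
    simp only [List.foldl_cons]
    rw [List.set_append_right _ _ (by omega)]
    simp only [Nat.add_sub_cancel_left]
    exact ih _

-- scatter-writing -1 at positions D*vi + di, vi < V, over a zero block of length V*D
-- produces V copies of the unit block
theorem scatter_eq_blocks (V : Nat) {D di : Nat} (hd : di < D) (tail : List Int) :
    (List.range V).foldl (fun r vi => r.set (D * vi + di) (-1))
        (List.replicate (V * D) (0 : Int) ++ tail)
      = (List.replicate V (pvUnit di D)).flatten ++ tail := by
  induction V generalizing tail with
  | zero => simp
  | succ n ih =>
    have hsplit : List.replicate ((n + 1) * D) (0 : Int) = List.replicate D 0 ++ List.replicate (n * D) 0 := by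
      rw [← List.replicate_add]; ring_nf
    rw [hsplit, List.range_succ_eq_map, List.foldl_cons, List.foldl_map]
    have h0 : ((List.replicate D (0 : Int) ++ List.replicate (n * D) 0 ++ tail).set (D * 0 + di) (-1))
        = pvUnit di D ++ (List.replicate (n * D) (0 : Int) ++ tail) := by
      simp only [Nat.mul_zero, Nat.zero_add]
      rw [List.append_assoc, List.set_append_left _ _ (by simp; omega), set_replicate_eq_unit hd]
    rw [h0]
    have hfun : ∀ (r : List Int) (vi : Nat),
        r.set (D * vi.succ + di) (-1) = r.set ((pvUnit di D).length + (D * vi + di)) (-1) := by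
      intro r vi
      rw [pvUnit_length hd, Nat.mul_succ]
      congr 1
      omega
    rw [PySem.List.foldl_congr_mem _ _
        (fun (r : List Int) (vi : Nat) => r.set ((pvUnit di D).length + (D * vi + di)) (-1)) _
        (fun r vi _ => hfun r vi)]
    rw [← List.foldl_map (f := fun vi => D * vi + di)
        (g := fun (r : List Int) i => r.set ((pvUnit di D).length + i) (-1)),
      fold_set_shift, List.foldl_map, ih]
    simp [List.replicate_succ]

-- a fold over zipIdx whose function only uses the index is a fold over range'
theorem foldl_zipIdx_snd {α β : Type} (l : List α) (n : Nat) (g : β → Nat → β) (init : β) :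
    (l.zipIdx n).foldl (fun r p => g r p.2) init = (List.range' n l.length).foldl g init := by
  induction l generalizing n init with
  | nil => rfl
  | cons x t ih =>
    simp only [List.zipIdx_cons, List.foldl_cons, List.length_cons, List.range'_succ]
    exact ih _ _

-- A's scatter-built row equals B's block-built row
theorem row_eq (M D mi di : Nat) (hm : mi < M) (hd : di < D) (mvsas : List Int) :
    (PySem.List.enumerate mvsas 0).foldl
        (fun r vv => PySem.List.pySetD r (pvIx (mi : Int) vv.1 (di : Int) (mvsas.length : Int) (D : Int)) (-1))
        (List.replicate (mvsas.length * M * D) (0 : Int))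
      = List.replicate (mi * mvsas.length * D) (0 : Int)
        ++ (List.replicate mvsas.length (pvUnit di D)).flatten
        ++ List.replicate ((M - 1 - mi) * mvsas.length * D) 0 := by
  rw [PySem.List.enumerate_eq_zipIdx_map, List.foldl_map]
  have hcongr : ∀ (r : List Int), ∀ p ∈ mvsas.zipIdx,
      PySem.List.pySetD r (pvIx (mi : Int) (0 + (p.2 : Int)) (di : Int) (mvsas.length : Int) (D : Int)) (-1)
        = r.set (D * (mvsas.length * mi) + (D * p.2 + di)) (-1) := by
    intro r p _
    have hix : pvIx (mi : Int) (0 + (p.2 : Int)) (di : Int) (mvsas.length : Int) (D : Int)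
        = ((D * (mvsas.length * mi) + (D * p.2 + di) : Nat) : Int) := by
      unfold pvIx; push_cast; ring
    rw [hix, PySem.List.pySetD_natCast]
  rw [PySem.List.foldl_congr_mem _ _
      (fun (r : List Int) (p : Int × Nat) => r.set (D * (mvsas.length * mi) + (D * p.2 + di)) (-1)) _
      hcongr]
  have hz : List.foldl (fun (r : List Int) (p : Int × Nat) => r.set (D * (mvsas.length * mi) + (D * p.2 + di)) (-1)) (List.replicate (mvsas.length * M * D) 0) mvsas.zipIdx
      = List.foldl (fun (r : List Int) i => r.set (D * (mvsas.length * mi) + (D * i + di)) (-1)) (List.replicate (mvsas.length * M * D) 0) (List.range mvsas.length) := by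
    rw [List.range_eq_range']
    exact foldl_zipIdx_snd mvsas 0
      (fun (r : List Int) i => r.set (D * (mvsas.length * mi) + (D * i + di)) (-1))
      (List.replicate (mvsas.length * M * D) 0)
  rw [hz]
  have hsplit : List.replicate (mvsas.length * M * D) (0 : Int)
      = List.replicate (D * (mvsas.length * mi)) 0
        ++ (List.replicate (mvsas.length * D) 0 ++ List.replicate ((M - 1 - mi) * mvsas.length * D) 0) := by
    rw [← List.replicate_add, ← List.replicate_add]
    congr 1
    obtain ⟨k, rfl⟩ : ∃ k, M = mi + 1 + k := ⟨M - 1 - mi, by omega⟩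
    have hk2 : mi + 1 + k - 1 - mi = k := by omega
    rw [hk2]; ring
  rw [hsplit]
  set pre := List.replicate (D * (mvsas.length * mi)) (0 : Int) with hpre
  have hlen : D * (mvsas.length * mi) = pre.length := by rw [hpre, List.length_replicate]
  rw [hlen]
  have hshift : List.foldl (fun (r : List Int) i => r.set (pre.length + (D * i + di)) (-1))
        (pre ++ (List.replicate (mvsas.length * D) 0 ++ List.replicate ((M - 1 - mi) * mvsas.length * D) 0))
        (List.range mvsas.length)
      = pre ++ List.foldl (fun (r : List Int) i => r.set (D * i + di) (-1))
          (List.replicate (mvsas.length * D) 0 ++ List.replicate ((M - 1 - mi) * mvsas.length * D) 0)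
          (List.range mvsas.length) := by
    calc List.foldl (fun (r : List Int) i => r.set (pre.length + (D * i + di)) (-1))
          (pre ++ (List.replicate (mvsas.length * D) 0 ++ List.replicate ((M - 1 - mi) * mvsas.length * D) 0))
          (List.range mvsas.length)
        = List.foldl (fun (r : List Int) j => r.set (pre.length + j) (-1))
            (pre ++ (List.replicate (mvsas.length * D) 0 ++ List.replicate ((M - 1 - mi) * mvsas.length * D) 0))
            ((List.range mvsas.length).map (fun i => D * i + di)) :=
          (List.foldl_map (f := fun i => D * i + di)
            (g := fun (r : List Int) j => r.set (pre.length + j) (-1))).symm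
      _ = pre ++ List.foldl (fun (r : List Int) j => r.set j (-1))
            (List.replicate (mvsas.length * D) 0 ++ List.replicate ((M - 1 - mi) * mvsas.length * D) 0)
            ((List.range mvsas.length).map (fun i => D * i + di)) :=
          fold_set_shift _ _ _ _
      _ = pre ++ List.foldl (fun (r : List Int) i => r.set (D * i + di) (-1))
            (List.replicate (mvsas.length * D) 0 ++ List.replicate ((M - 1 - mi) * mvsas.length * D) 0)
            (List.range mvsas.length) := congrArg (pre ++ ·) List.foldl_map
  rw [hshift, scatter_eq_blocks mvsas.length hd, hpre]
  have h9 : D * (mvsas.length * mi) = mi * mvsas.length * D := by ring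
  rw [h9, List.append_assoc]

-- ===== VERDICT (by name: the statement is the Claim_ definition above) =====
theorem get_museum_req_constraints_spec : Claim_equal_get_museum_req_constraints := by
  intro museums mvsas days _dom _pre
  unfold Spec_get_museum_req_constraints get_museum_req_constraints get_museum_req_constraints_alt
  dsimp only
  apply PySem.List.foldl_congr_mem
  intro acc mm hmm
  apply PySem.List.foldl_congr_mem
  intro acc2 dd hdd
  rw [PySem.List.enumerate_eq_zipIdx_map] at hmm hdd
  obtain ⟨pm, hpm, rfl⟩ := List.mem_map.mp hmm
  obtain ⟨pd, hpd, rfl⟩ := List.mem_map.mp hdd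
  obtain ⟨-, hmlt, -⟩ := List.mem_zipIdx hpm
  obtain ⟨-, hdlt, -⟩ := List.mem_zipIdx hpd
  simp only [Nat.zero_add] at hmlt hdlt
  simp only [Prod.mk.injEq]
  constructor
  · congr 1
    congr 1
    -- rowA = rowB
    have hrow := row_eq museums.length days.length pm.2 pd.2 hmlt hdlt mvsas
    simp only [zero_add] at hrow ⊢
    rw [hrow]
    -- now rewrite B's pyRepeats into replicates/flatten
    have c1 : ((pm.2 : Int) * (mvsas.length : Int) * (days.length : Int)).toNat
        = pm.2 * mvsas.length * days.length := by
      have : ((pm.2 : Int) * (mvsas.length : Int) * (days.length : Int))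
          = ((pm.2 * mvsas.length * days.length : Nat) : Int) := by push_cast; ring
      rw [this, Int.toNat_natCast]
    have c2 : (((museums.length : Int) - 1 - (pm.2 : Int)) * (mvsas.length : Int) * (days.length : Int)).toNat
        = (museums.length - 1 - pm.2) * mvsas.length * days.length := by
      have h1 : ((museums.length : Int) - 1 - (pm.2 : Int)) = ((museums.length - 1 - pm.2 : Nat) : Int) := by
        omega
      rw [h1]
      have : (((museums.length - 1 - pm.2 : Nat) : Int) * (mvsas.length : Int) * (days.length : Int))
          = (((museums.length - 1 - pm.2) * mvsas.length * days.length : Nat) : Int) := by push_cast; ring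
      rw [this, Int.toNat_natCast]
    have c3 : ((days.length : Int) - 1 - (pd.2 : Int)).toNat = days.length - 1 - pd.2 := by omega
    simp only [PySem.List.pyRepeat_singleton, c1, c2, c3, Int.toNat_natCast]
    have hunit : (PySem.List.pyRepeat (List.replicate pd.2 (0 : Int) ++ [-1] ++ List.replicate (days.length - 1 - pd.2) 0) (mvsas.length : Int))
        = (List.replicate mvsas.length (pvUnit pd.2 days.length)).flatten := by
      unfold PySem.List.pyRepeat pvUnit
      rw [Int.toNat_natCast]
    rw [hunit]
  · congr 1
    congr 1
    ring
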